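-- pv_equiv track=rewrite | github.com/EliasJRH/COMP-1405Z-Problem-Set-Solutions | Set 6 - Dictionaries/P2 - Dictionaries and Caching.py | cachedfactorial
-- ===== SOURCE A (Python) =====
-- def cachedfactorial(num, facs):
--     fac = 1
--     for x in range(num, 0, -1):
--         if x in facs:
--             fac *= facs[x]
--             facs[num] = fac
--             return fac
--         else:
--             fac *= x
--     facs[num] = fac
--     return fac
-- ===== SOURCE B (Python) =====
-- def cachedfactorial(num, facs):
--     # Find the largest cached key k with 1 <= k <= num, seed fac from it,
--     # then multiply forward; writes only facs[num], like the original.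
--     cached = [k for k in facs if 1 <= k <= num]
--     if cached:
--         k = max(cached)
--         fac = facs[k]
--     else:
--         k = 0
--         fac = 1
--     for x in range(k + 1, num + 1):
--         fac *= x
--     facs[num] = fac
--     return fac
-- ===== Notes on version B (the rewrite author's own statement) =====
-- stated objective: alternative
-- what changed: Replaces the descending short-circuit scan with membership tests by a single pass over the cache keys to pick the largest cached key k <= num, then one forward product over range(k+1, num+1); still writes only facs[num].
import Mathlib
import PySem

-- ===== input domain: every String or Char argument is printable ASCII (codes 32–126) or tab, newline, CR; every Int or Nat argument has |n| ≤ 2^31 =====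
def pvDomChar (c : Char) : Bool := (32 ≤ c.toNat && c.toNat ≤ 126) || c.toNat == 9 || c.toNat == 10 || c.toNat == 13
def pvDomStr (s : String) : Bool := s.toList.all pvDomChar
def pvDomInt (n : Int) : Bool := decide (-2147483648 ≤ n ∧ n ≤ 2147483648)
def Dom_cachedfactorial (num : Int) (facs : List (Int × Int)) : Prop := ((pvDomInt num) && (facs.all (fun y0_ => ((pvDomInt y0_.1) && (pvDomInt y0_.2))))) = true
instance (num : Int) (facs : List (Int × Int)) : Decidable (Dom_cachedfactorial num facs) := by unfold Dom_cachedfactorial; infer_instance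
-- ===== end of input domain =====

-- B replaces the descending cached-key scan by: pick the largest cached key ≤ num, then
-- one forward product. Equivalence is about the RETURN value; both A and B mutate facs
-- identically in Python (only facs[num] is written), which is not modelled here.

-- ===== PORT A =====
-- loop 'for x in range(num, 0, -1)' with early return
def cachedfacLoopA (facs : List (Int × Int)) : List Int → Int → Int
  | [], fac => fac
  | x :: xs, fac =>
    if (facs.map Prod.fst).contains x then
      fac * ((facs.lookup x).getD 0)   -- facs[x]; guarded by the membership test, so present
    else
      cachedfacLoopA facs xs (fac * x)

def cachedfactorial (num : Int) (facs : List (Int × Int)) : Int :=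
  cachedfacLoopA facs (PySem.List.pyRange num 0 (-1)) 1

-- ===== PORT B =====
def cachedfactorial_alt (num : Int) (facs : List (Int × Int)) : Int :=
  let cached := (facs.map Prod.fst).filter (fun k => decide (1 ≤ k ∧ k ≤ num))
  match PySem.List.max? cached (fun x => x) with
  | some k => (PySem.List.pyRange (k + 1) (num + 1) 1).foldl (· * ·) ((facs.lookup k).getD 0)   -- facs[k]; k is a key, so present
  | none => (PySem.List.pyRange (0 + 1) (num + 1) 1).foldl (· * ·) 1

-- ===== PRECONDITION & SPEC =====
def Spec_cachedfactorial (num : Int) (facs : List (Int × Int)) (out : Int) : Prop := out = cachedfactorial_alt num facs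
instance (num : Int) (facs : List (Int × Int)) (out : Int) : Decidable (Spec_cachedfactorial num facs out) := by unfold Spec_cachedfactorial; infer_instance

-- ===== CLAIM (what is proved, stated in full; the proofs are below) =====
def Claim_equal_cachedfactorial : Prop := ∀ (num : Int) (facs : List (Int × Int)), Dom_cachedfactorial num facs → Spec_cachedfactorial num facs (cachedfactorial num facs)

-- ===== LEMMAS AND PROOFS =====


-- base case: for num ≤ 0 both sides are fac
theorem cachedfactorial_base (facs : List (Int × Int)) (num : Int) (h0 : num ≤ 0) (fac : Int) :
    cachedfacLoopA facs (PySem.List.pyRange num 0 (-1)) fac =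
      match PySem.List.max? ((facs.map Prod.fst).filter (fun k => decide (1 ≤ k ∧ k ≤ num))) (fun x => x) with
      | some k => fac * ((PySem.List.pyRange (k + 1) (num + 1) 1).foldl (· * ·) ((facs.lookup k).getD 0))
      | none => fac * ((PySem.List.pyRange (0 + 1) (num + 1) 1).foldl (· * ·) 1) := by
  have hfil : (facs.map Prod.fst).filter (fun k => decide (1 ≤ k ∧ k ≤ num)) = [] := by
    rw [List.filter_eq_nil_iff]
    intro k _
    simp only [decide_eq_true_eq]
    omega
  have hnil : PySem.List.pyRange num 0 (-1) = [] := PySem.List.pyRange_neg_one_eq_nil h0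
  have hnil2 : PySem.List.pyRange (0 + 1) (num + 1) 1 = [] := by
    apply PySem.List.pyRange_one_eq_nil; omega
  rw [hnil, hfil, hnil2]
  simp [cachedfacLoopA, PySem.List.max?]

theorem cachedfactorial_main (facs : List (Int × Int)) :
    ∀ (n : Nat) (num : Int), num ≤ (n : Int) → ∀ fac : Int,
      cachedfacLoopA facs (PySem.List.pyRange num 0 (-1)) fac =
        match PySem.List.max? ((facs.map Prod.fst).filter (fun k => decide (1 ≤ k ∧ k ≤ num))) (fun x => x) with
        | some k => fac * ((PySem.List.pyRange (k + 1) (num + 1) 1).foldl (· * ·) ((facs.lookup k).getD 0))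
        | none => fac * ((PySem.List.pyRange (0 + 1) (num + 1) 1).foldl (· * ·) 1) := by
  intro n
  induction n with
  | zero =>
    intro num hle fac
    exact cachedfactorial_base facs num (by exact_mod_cast hle) fac
  | succ n ih =>
    intro num hle fac
    by_cases h0 : num ≤ 0
    · exact cachedfactorial_base facs num h0 fac
    · rw [not_le] at h0
      rw [PySem.List.pyRange_neg_one_cons h0]
      simp only [cachedfacLoopA]
      by_cases hc : (facs.map Prod.fst).contains num
      · -- num is a cached key: A returns fac * facs[num]; the max cached key is num itself
        rw [if_pos hc]
        have hmem : num ∈ facs.map Prod.fst := by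
          simpa using hc
        have hmemf : num ∈ (facs.map Prod.fst).filter (fun k => decide (1 ≤ k ∧ k ≤ num)) := by
          rw [List.mem_filter]
          exact ⟨hmem, by simp; omega⟩
        obtain ⟨m, hm⟩ : ∃ m, PySem.List.max? ((facs.map Prod.fst).filter (fun k => decide (1 ≤ k ∧ k ≤ num))) (fun x => x) = some m := by
          cases hmax : PySem.List.max? ((facs.map Prod.fst).filter (fun k => decide (1 ≤ k ∧ k ≤ num))) (fun x => x) with
          | none =>
            rw [PySem.List.max?_eq_none_iff] at hmax
            rw [hmax] at hmemf
            exact absurd hmemf (List.not_mem_nil)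
          | some m => exact ⟨m, rfl⟩
        have hmmem := PySem.List.max?_mem hm
        have hmle : m ≤ num := by
          rw [List.mem_filter] at hmmem
          have := hmmem.2
          simp only [decide_eq_true_eq] at this
          omega
        have hnm : num ≤ m := PySem.List.max?_isMax hm num hmemf
        have hmeq : m = num := le_antisymm hmle hnm
        rw [hm, hmeq]
        have hr : PySem.List.pyRange (num + 1) (num + 1) 1 = [] := PySem.List.pyRange_one_eq_nil le_rfl
        simp [hr]
      · -- num not cached: step to num - 1
        rw [if_neg hc]
        have hnotmem : num ∉ facs.map Prod.fst := by simpa using hc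
        have hfc : (facs.map Prod.fst).filter (fun k => decide (1 ≤ k ∧ k ≤ num))
            = (facs.map Prod.fst).filter (fun k => decide (1 ≤ k ∧ k ≤ num - 1)) := by
          apply List.filter_congr
          intro k hk
          have : k ≠ num := fun h => hnotmem (h ▸ hk)
          simp only [decide_eq_decide]
          omega
        have hih := ih (num - 1) (by omega) (fac * num)
        rw [hih, hfc]
        cases hmax : PySem.List.max? ((facs.map Prod.fst).filter (fun k => decide (1 ≤ k ∧ k ≤ num - 1))) (fun x => x) with
        | none =>
          simp only
          have h1 : PySem.List.pyRange (0 + 1) (num + 1) 1 = PySem.List.pyRange (0 + 1) num 1 ++ [num] := by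
            have := PySem.List.pyRange_one_succ_right (a := 0 + 1) (b := num) (by omega)
            simpa using this
          have h2 : num - 1 + 1 = num := by omega
          rw [h2, h1, List.foldl_append]
          simp only [List.foldl_cons, List.foldl_nil]
          ring
        | some k =>
          simp only
          have hkmem := PySem.List.max?_mem hmax
          have hkle : k ≤ num - 1 := by
            rw [List.mem_filter] at hkmem
            have := hkmem.2
            simp only [decide_eq_true_eq] at this
            omega
          have h1 : PySem.List.pyRange (k + 1) (num + 1) 1 = PySem.List.pyRange (k + 1) num 1 ++ [num] := by
            have := PySem.List.pyRange_one_succ_right (a := k + 1) (b := num) (by omega)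
            simpa using this
          have h2 : num - 1 + 1 = num := by omega
          rw [h2, h1, List.foldl_append]
          simp only [List.foldl_cons, List.foldl_nil]
          ring

-- ===== VERDICT (by name: the statement is the Claim_ definition above) =====
theorem cachedfactorial_spec : Claim_equal_cachedfactorial := by
  intro num facs _
  unfold Spec_cachedfactorial cachedfactorial cachedfactorial_alt
  have hn : num ≤ ((num.toNat : Nat) : Int) := Int.self_le_toNat num
  rw [cachedfactorial_main facs num.toNat num hn 1]
  cases hmax : PySem.List.max? ((facs.map Prod.fst).filter (fun k => decide (1 ≤ k ∧ k ≤ num))) (fun x => x) with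
  | none => simp only [one_mul]; rw [hmax]
  | some k => simp only [one_mul]; rw [hmax]
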